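-- pv_equiv track=rewrite | github.com/alexyanw/dse203-group-project | query_capability/datalog_parser.py | getJoinColumns
-- ===== SOURCE A (Python) =====
-- def getJoinColumns(table_columns):
--     col_map = {}
--     for table,columns in table_columns.items():
--         for col in columns:
--             if col == '_': continue
--             if col in col_map:
--                 col_map[col].append(table)
--             else:
--                 col_map[col] = [table]
--
--     return {col: col_map[col] for col in col_map if len(col_map[col]) > 1}
-- ===== SOURCE B (Python) =====
-- def getJoinColumns(table_columns):
--     # pass 1: count occurrences of each column (skip '_'), duplicates included
--     counts = {}
--     for table, columns in table_columns.items():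
--         for col in columns:
--             if col != '_':
--                 counts[col] = counts.get(col, 0) + 1
--     # pass 2: rescan the raw input; append each qualifying occurrence
--     result = {}
--     for table, columns in table_columns.items():
--         for col in columns:
--             if col != '_' and counts[col] > 1:
--                 result.setdefault(col, []).append(table)
--     return result
-- ===== Notes on version B (the rewrite author's own statement) =====
-- stated objective: alternative
-- what changed: B replaces A's single group-into-lists-then-filter-the-built-map pass by two passes over the raw input: a counting pass (dict of occurrence counts) followed by a rescan of the input that appends each qualifying occurrence with setdefault; no map of table-lists is ever filtered.
import Mathlib
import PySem

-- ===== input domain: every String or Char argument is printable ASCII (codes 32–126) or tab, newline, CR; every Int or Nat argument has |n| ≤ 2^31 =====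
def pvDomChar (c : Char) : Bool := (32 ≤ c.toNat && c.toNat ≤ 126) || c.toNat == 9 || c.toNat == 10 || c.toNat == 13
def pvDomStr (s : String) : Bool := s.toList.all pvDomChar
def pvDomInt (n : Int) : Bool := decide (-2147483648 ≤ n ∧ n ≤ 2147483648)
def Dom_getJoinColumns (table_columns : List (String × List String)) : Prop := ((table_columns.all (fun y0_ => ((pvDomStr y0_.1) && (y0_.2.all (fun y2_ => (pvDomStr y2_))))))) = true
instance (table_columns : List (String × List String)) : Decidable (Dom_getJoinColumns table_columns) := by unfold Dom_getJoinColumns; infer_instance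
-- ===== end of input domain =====

-- B separates counting from list-building: a counting pass over the raw input, then a rescan of the
-- raw input appending each qualifying occurrence (objective: alternative decomposition, same cost).

-- ===== PORT A =====
def getJoinColumns (table_columns : List (String × List String)) : List (String × List String) :=
  let col_map : PySem.Dict String (List String) :=
    table_columns.foldl (fun d p =>
      p.2.foldl (fun d col =>
        if col = "_" then d
        else if d.contains col then d.modify col [] (fun v => v ++ [p.1])  -- col_map[col].append(table)
        else d.insert col [p.1]) d) PySem.Dict.empty
  -- {col: col_map[col] for col in col_map if len(col_map[col]) > 1}; col_map[col] is getD (key present)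
  (col_map.keys.foldl (fun r col =>
      if (col_map.getD col []).length > 1 then r.insert col (col_map.getD col []) else r)
    PySem.Dict.empty).items

-- ===== PORT B =====
def getJoinColumns_alt (table_columns : List (String × List String)) : List (String × List String) :=
  let counts : PySem.Dict String Int :=
    table_columns.foldl (fun d p =>
      p.2.foldl (fun d col =>
        if col ≠ "_" then d.insert col (d.getD col 0 + 1) else d) d) PySem.Dict.empty
  -- counts[col] is getD (the guard col != '_' guarantees the key was counted in pass 1)
  (table_columns.foldl (fun r p =>
      p.2.foldl (fun r col =>
        if col ≠ "_" ∧ counts.getD col 0 > 1 then r.modify col [] (fun v => v ++ [p.1])  -- setdefault+append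
        else r) r) PySem.Dict.empty).items

-- ===== PRECONDITION & SPEC =====
def Spec_getJoinColumns (table_columns : List (String × List String)) (out : List (String × List String)) : Prop := out = getJoinColumns_alt table_columns
instance (table_columns : List (String × List String)) (out : List (String × List String)) : Decidable (Spec_getJoinColumns table_columns out) := by unfold Spec_getJoinColumns; infer_instance

-- ===== CLAIM (what is proved, stated in full; the proofs are below) =====
def Claim_equal_getJoinColumns : Prop := ∀ (table_columns : List (String × List String)), Dom_getJoinColumns table_columns → Spec_getJoinColumns table_columns (getJoinColumns table_columns)

-- ===== LEMMAS AND PROOFS =====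

-- the (column, table) occurrences, '_' skipped, in traversal order
def pairsOf (tc : List (String × List String)) : List (String × String) :=
  tc.flatMap (fun p => (p.2.filter (fun c => c ≠ "_")).map (fun c => (c, p.1)))

theorem inner_loop {δ : Type} (f : δ → String → String → δ) (t : String) (cs : List String) (d : δ) :
    cs.foldl (fun d c => if c = "_" then d else f d c t) d
      = ((cs.filter (fun c => c ≠ "_")).map (fun c => (c, t))).foldl (fun d q => f d q.1 q.2) d := by
  induction cs generalizing d with
  | nil => rfl
  | cons c cs ih =>
    by_cases h : c = "_" <;> simp [h, ih]

theorem nested_loop {δ : Type} (f : δ → String → String → δ)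
    (tc : List (String × List String)) (init : δ) :
    tc.foldl (fun d p => p.2.foldl (fun d c => if c = "_" then d else f d c p.1) d) init
      = (pairsOf tc).foldl (fun d q => f d q.1 q.2) init := by
  induction tc generalizing init with
  | nil => rfl
  | cons p tc ih =>
    simp only [List.foldl_cons]
    rw [ih]
    simp only [pairsOf, List.flatMap_cons, List.foldl_append, inner_loop]

-- set(...) of a filtered list is the filtered set (keep-first dedup commutes with filter)
theorem ofList_filter (p : String → Bool) (m : List String) :
    PySem.Set.ofList (m.filter p) = (PySem.Set.ofList m).filter p := by
  induction m using List.reverseRecOn with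
  | nil => rfl
  | append_singleton m x ih =>
    by_cases h : p x
    · rw [List.filter_append, PySem.Set.ofList_append_singleton]
      by_cases hm : x ∈ m
      · have h1 : x ∈ PySem.Set.ofList m := (PySem.Set.mem_ofList _ _).2 hm
        have h2 : x ∈ PySem.Set.ofList (m.filter p) :=
          (PySem.Set.mem_ofList _ _).2 (List.mem_filter.2 ⟨hm, h⟩)
        simp [h, PySem.Set.ofList_append_singleton, h1, ih]
      · have h1 : x ∉ PySem.Set.ofList m := fun hx => hm ((PySem.Set.mem_ofList _ _).1 hx)
        have h2 : x ∉ PySem.Set.ofList (m.filter p) := fun hx =>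
          hm (List.mem_filter.1 ((PySem.Set.mem_ofList _ _).1 hx)).1
        simp [h, PySem.Set.ofList_append_singleton, h1, ih, List.filter_append]
    · by_cases hm : x ∈ m
      · have h1 : x ∈ PySem.Set.ofList m := (PySem.Set.mem_ofList _ _).2 hm
        simp [List.filter_append, h, PySem.Set.ofList_append_singleton, h1, ih]
      · have h1 : x ∉ PySem.Set.ofList m := fun hx => hm ((PySem.Set.mem_ofList _ _).1 hx)
        simp [List.filter_append, h, PySem.Set.ofList_append_singleton, h1, ih]


-- A's two-branch dict update is exactly 'modify with default []'
theorem step_eq (d : PySem.Dict String (List String)) (c t : String) :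
    (if d.contains c then d.modify c [] (fun v => v ++ [t]) else d.insert c [t])
      = d.modify c [] (fun v => v ++ [t]) := by
  by_cases h : d.contains c
  · simp [h]
  · have h' : d.contains c = false := by simpa using h
    have hmod : d.modify c [] (fun v => v ++ [t]) = d.insert c (d.getD c [] ++ [t]) :=
      PySem.Dict.ext_iff.mpr rfl
    simp [h, hmod, PySem.Dict.getD_of_not_contains d [] h']

-- B's conjunctive guard written as A's '_'-skip followed by the count test
theorem ite_and_ne {δ : Type} (c : String) (P : Prop) [Decidable P] (a b : δ) :
    (if c ≠ "_" ∧ P then a else b) = if c = "_" then b else if P then a else b := by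
  by_cases h1 : c = "_" <;> by_cases h2 : P <;> simp [h1, h2]

-- a guarded foldl is a foldl over the filtered list
theorem foldl_if_filter {α δ : Type} (X : α → Prop) [DecidablePred X]
    (g : δ → α → δ) (l : List α) (init : δ) :
    l.foldl (fun r a => if X a then g r a else r) init
      = (l.filter (fun a => decide (X a))).foldl g init := by
  rw [List.foldl_filter]; simp

-- a filter by a predicate on the key commutes with projecting the key
theorem filter_key (ps : List (String × String)) (pb : String → Bool) :
    (ps.filter (fun q => pb q.1)).map (fun q => q.1) = (ps.map (fun q => q.1)).filter pb := by
  induction ps with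
  | nil => rfl
  | cons q ps ih => by_cases h : pb q.1 <;> simp [h, ih]

-- the group of a column has as many entries as the column occurs
theorem count_fact (ps : List (String × String)) (c : String) :
    ((ps.filter (fun q => q.1 == c)).map (fun q => q.2)).length = (ps.map (fun q => q.1)).count c := by
  simp [List.count, List.countP_map]
  rw [List.countP_eq_length_filter]
  rfl

-- restricting to one qualifying column, the count filter is vacuous
theorem filter_filter_key (ps : List (String × String)) (c : String)
    (hc : 1 < (ps.map (fun q => q.1)).count c) :
    (ps.filter (fun q => decide (1 < (ps.map (fun q => q.1)).count q.1))).filter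
        (fun q => q.1 == c)
      = ps.filter (fun q => q.1 == c) := by
  rw [List.filter_filter]
  apply List.filter_congr
  intro q _
  by_cases hq : q.1 == c
  · have : q.1 = c := by exact eq_of_beq hq
    simp [this, hc]
  · simp [hq]

theorem getJoinColumns_spec : Claim_equal_getJoinColumns := by
  intro tc _
  show getJoinColumns tc = getJoinColumns_alt tc
  simp only [getJoinColumns, getJoinColumns_alt]
  set ps := pairsOf tc with hps
  set m : List String := ps.map (fun q => q.1) with hm
  set pred : String → Bool := fun c => decide (1 < m.count c) with hpred
  set G := ps.foldl (fun d q => d.modify q.1 [] (fun v => v ++ [q.2])) PySem.Dict.empty with hG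
  -- A's grouping pass is the flat modify-append fold
  have hA1 : (tc.foldl (fun d p => p.2.foldl (fun d col =>
      if col = "_" then d
      else if d.contains col then d.modify col [] (fun v => v ++ [p.1])
      else d.insert col [p.1]) d) PySem.Dict.empty) = G := by
    rw [nested_loop (fun d c t =>
      if d.contains c then d.modify c [] (fun v => v ++ [t]) else d.insert c [t]) tc
      PySem.Dict.empty]
    simp only [step_eq, hG, hps]
  have hGd : ∀ c, G.getD c [] = (ps.filter (fun q => q.1 == c)).map (fun q => q.2) := by
    intro c
    rw [hG, PySem.Dict.getD_foldl_modify_append]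
    simp
  have hGkeys : G.keys = PySem.Set.ofList m := by
    rw [hG, PySem.Dict.keys_foldl_modify_key]
    simp [PySem.Set.update_nil_left, hm]
  -- B's counting pass counts occurrences
  have hB1 : (tc.foldl (fun d p => p.2.foldl (fun d col =>
      if col ≠ "_" then d.insert col (d.getD col 0 + 1) else d) d)
        (PySem.Dict.empty : PySem.Dict String Int))
      = m.foldl (fun d x => d.insert x (d.getD x 0 + 1)) PySem.Dict.empty := by
    simp only [ite_not]
    refine Eq.trans (nested_loop (fun d c _ => d.insert c (d.getD c 0 + 1)) tc
      (PySem.Dict.empty : PySem.Dict String Int)) ?_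
    rw [hm, List.foldl_map]
  set counts : PySem.Dict String Int :=
    m.foldl (fun d x => d.insert x (d.getD x 0 + 1)) PySem.Dict.empty with hcounts
  have hcnt : ∀ c, counts.getD c 0 = (m.count c : Int) := by
    intro c
    rw [hcounts, PySem.Dict.getD_foldl_insert_add_one]
    simp
  rw [hA1, hB1]
  -- A's output comprehension
  rw [foldl_if_filter (fun col => (G.getD col []).length > 1)
      (fun r col => r.insert col (G.getD col [])) G.keys PySem.Dict.empty]
  have hpA : (fun col => decide ((G.getD col []).length > 1)) = pred := by
    funext c
    rw [hpred]
    congr 1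
    rw [hGd, count_fact, hm]
  rw [hpA, hGkeys]
  set KA : List String := (PySem.Set.ofList m).filter pred with hKA
  have hKAnd : KA.Nodup := List.Nodup.filter _ (PySem.Set.nodup_ofList m)
  have hAitems : (KA.foldl (fun r col => r.insert col (G.getD col [])) PySem.Dict.empty).items
      = KA.map (fun c => (c, G.getD c [])) := by
    refine Eq.trans (PySem.Dict.items_foldl_insert_fresh KA (fun c => c)
      (fun c => G.getD c []) PySem.Dict.empty
      (fun a _ => PySem.Dict.contains_empty a) (by simpa using hKAnd)) ?_
    simp
    rfl
  rw [hAitems]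
  -- B's rescan pass
  have hB2 : (tc.foldl (fun r p => p.2.foldl (fun r col =>
      if col ≠ "_" ∧ counts.getD col 0 > 1 then r.modify col [] (fun v => v ++ [p.1]) else r) r)
      PySem.Dict.empty)
      = (ps.filter (fun q => pred q.1)).foldl
          (fun r q => r.modify q.1 [] (fun v => v ++ [q.2])) PySem.Dict.empty := by
    simp only [ite_and_ne]
    refine Eq.trans (Eq.trans (nested_loop (fun r c t =>
        if counts.getD c 0 > 1 then r.modify c [] (fun v => v ++ [t]) else r) tc
        PySem.Dict.empty)
      (foldl_if_filter (fun q : String × String => counts.getD q.1 0 > 1)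
        (fun r q => r.modify q.1 [] (fun v => v ++ [q.2])) ps PySem.Dict.empty)) ?_
    congr 1
    apply List.filter_congr
    intro q _
    rw [hpred]
    simp only [hcnt, gt_iff_lt]
    congr 1
    simp [Nat.one_lt_cast]
  rw [hB2]
  set qs := ps.filter (fun q => pred q.1) with hqs
  set R := qs.foldl (fun r q => r.modify q.1 [] (fun v => v ++ [q.2])) PySem.Dict.empty with hR
  have hRd : ∀ c, R.getD c [] = (qs.filter (fun q => q.1 == c)).map (fun q => q.2) := by
    intro c
    rw [hR, PySem.Dict.getD_foldl_modify_append]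
    simp
  have hRkeys : R.keys = KA := by
    rw [hR, PySem.Dict.keys_foldl_modify_key]
    simp only [PySem.Dict.keys_empty, PySem.Set.update_nil_left]
    rw [hqs, filter_key, ← hm, ofList_filter, hKA]
  have hRnd : R.keys.Nodup := by rw [hRkeys]; exact hKAnd
  rw [PySem.Dict.items_eq_map_keys R hRnd [], hRkeys]
  apply List.map_congr_left
  intro c hc
  have hcC : 1 < m.count c := by
    have := (List.mem_filter.1 (hKA ▸ hc)).2
    rw [hpred] at this
    exact of_decide_eq_true this
  have : R.getD c [] = G.getD c [] := by
    rw [hRd, hGd, hqs, hpred, filter_filter_key ps c hcC]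
  rw [this]
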